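-- pv_equiv track=rewrite | github.com/Eusha-Kayenat/CSE-Lab-Works | CSE 111/Lab 2/Classworks/Task 6.py | correct_capitalization
-- ===== SOURCE A (Python) =====
-- def correct_capitalization(text):
--     text = list(text)
--     if text:
--         text[0] = text[0].upper()
--     for i in range(1, len(text)):
--         if text[i - 1] in ['.', '!', '?']:
--             text[i] = text[i].upper()
--         elif text[i] == 'i' and (i == 0 or text[i-1] != "'"):
--             text[i] = 'I'
--     return ''.join(text)
-- ===== SOURCE B (Python) =====
-- import re
--
--
-- def correct_capitalization(text):
--     # Pass 1: uppercase the first character and each character immediately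
--     # following '.', '!' or '?' (zero-width lookbehind keeps the punctuation).
--     text = re.sub(r"(?:(?<=[.!?])|^).", lambda m: m.group(0).upper(), text)
--     # Pass 2: uppercase every 'i' not preceded by an apostrophe.
--     return re.sub(r"(?<!')i", "I", text)
-- ===== Notes on version B (the rewrite author's own statement) =====
-- stated objective: idiomatic
-- what changed: Replaces the in-place index loop over a char list with two regex substitutions (one uppercases the first character and each character immediately after sentence-ending punctuation, the other uppercases each lowercase letter i not preceded by an apostrophe); the C regex engine replaces the per-character Python loop, a constant-factor speedup.
import Mathlib
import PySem

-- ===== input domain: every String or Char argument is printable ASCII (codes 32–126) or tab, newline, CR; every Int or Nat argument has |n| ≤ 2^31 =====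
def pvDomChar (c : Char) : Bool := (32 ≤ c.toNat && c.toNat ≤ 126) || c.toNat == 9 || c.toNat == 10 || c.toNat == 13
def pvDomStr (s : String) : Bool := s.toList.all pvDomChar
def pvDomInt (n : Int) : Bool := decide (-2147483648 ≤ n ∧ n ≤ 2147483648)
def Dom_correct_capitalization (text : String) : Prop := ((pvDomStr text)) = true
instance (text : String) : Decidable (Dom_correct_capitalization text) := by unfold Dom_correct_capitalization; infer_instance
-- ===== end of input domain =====

-- B replaces A's in-place index loop with two regex-style substitution passes (more idiomatic); return values proved equal.

-- ===== PORT A =====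
-- A: text = list(text); uppercase text[0]; index loop mutating the list in place.
-- Indices i in range(1, len) are always in bounds, so getD's default is never read.
def correct_capitalization (text : String) : String :=
  let l : List Char := text.toList
  let l1 : List Char :=
    match l with
    | [] => []
    | c :: rest => PySem.Chars.upperChar c :: rest
  let l2 : List Char :=
    (List.range' 1 (l1.length - 1)).foldl (fun acc i =>
      if acc.getD (i - 1) ' ' ∈ (['.', '!', '?'] : List Char) then
        acc.set i (PySem.Chars.upperChar (acc.getD i ' '))
      else if acc.getD i ' ' = 'i' ∧ (i = 0 ∨ acc.getD (i - 1) ' ' ≠ '\'') then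
        acc.set i 'I'
      else acc) l1
  String.ofList l2

-- ===== PORT B =====
-- Hand port of Source B's two re.sub passes (exact for these patterns on any string):
-- pass 1 is `(?:(?<=[.!?])|^).` with .upper() — the lookbehind reads the ORIGINAL
-- previous character (re.sub matches on the input string), so the tail recursion
-- threads the original char as `prev`; `.` never matches '\n', but upper('\n') = '\n'
-- so uppercasing unconditionally is exact.
def cc_sub1_tail (prev : Char) : List Char → List Char
  | [] => []
  | c :: rest =>
      (if prev ∈ (['.', '!', '?'] : List Char) then PySem.Chars.upperChar c else c)
        :: cc_sub1_tail c rest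

def cc_sub1 : List Char → List Char
  | [] => []
  | c :: rest => PySem.Chars.upperChar c :: cc_sub1_tail c rest

-- pass 2 is `(?<!')i` → "I": at the string start the lookbehind fails (prev = none).
def cc_sub2 (prev : Option Char) : List Char → List Char
  | [] => []
  | c :: rest =>
      (if c = 'i' ∧ prev ≠ some '\'' then 'I' else c) :: cc_sub2 (some c) rest

def correct_capitalization_alt (text : String) : String :=
  String.ofList (cc_sub2 none (cc_sub1 text.toList))

-- ===== PRECONDITION & SPEC =====
def Spec_correct_capitalization (text : String) (out : String) : Prop := out = correct_capitalization_alt text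
instance (text : String) (out : String) : Decidable (Spec_correct_capitalization text out) := by unfold Spec_correct_capitalization; infer_instance

-- ===== CLAIM (what is proved, stated in full; the proofs are below) =====
def Claim_equal_correct_capitalization : Prop := ∀ (text : String), Dom_correct_capitalization text → Spec_correct_capitalization text (correct_capitalization text)

-- ===== LEMMAS AND PROOFS =====

-- Canonical form both ports are reduced to: the transformed char at each position
-- as a function of the ORIGINAL previous char and the ORIGINAL current char.
def ccF (p c : Char) : Char :=
  if p ∈ (['.', '!', '?'] : List Char) then PySem.Chars.upperChar c
  else if c = 'i' ∧ p ≠ '\'' then 'I' else c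

def ccGo (p : Char) : List Char → List Char
  | [] => []
  | c :: rest => ccF p c :: ccGo c rest

def ccSpec : List Char → List Char
  | [] => []
  | c :: rest => PySem.Chars.upperChar c :: ccGo c rest

-- upperChar only moves 'a'..'z' to 'A'..'Z'
theorem upperChar_eq_sym (c d : Char) (hd : d.toNat < 65) :
    PySem.Chars.upperChar c = d ↔ c = d := by
  unfold PySem.Chars.upperChar PySem.Chars.islower
  by_cases h : 'a' ≤ c ∧ c ≤ 'z'
  · have h97 : 97 ≤ c.toNat := h.1
    have h122 : c.toNat ≤ 122 := h.2
    have hv : (Char.ofNat (c.toNat - 32)).toNat = c.toNat - 32 := by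
      rw [Char.toNat_ofNat, if_pos (Or.inl (by omega))]
    rw [if_pos (by simp [h.1, h.2])]
    constructor
    · intro he
      exfalso
      have := congrArg Char.toNat he
      rw [hv] at this
      omega
    · intro he
      exfalso
      have := congrArg Char.toNat he
      omega
  · rw [if_neg (by simp only [Bool.and_eq_true, decide_eq_true_eq]; exact h)]

theorem upperChar_ne_i (c : Char) : PySem.Chars.upperChar c ≠ 'i' := by
  unfold PySem.Chars.upperChar PySem.Chars.islower
  by_cases h : 'a' ≤ c ∧ c ≤ 'z'
  · have h97 : 97 ≤ c.toNat := h.1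
    have h122 : c.toNat ≤ 122 := h.2
    have hv : (Char.ofNat (c.toNat - 32)).toNat = c.toNat - 32 := by
      rw [Char.toNat_ofNat, if_pos (Or.inl (by omega))]
    rw [if_pos (by simp [h.1, h.2])]
    intro he
    have := congrArg Char.toNat he
    rw [hv] at this
    simp only [show ('i' : Char).toNat = 105 from rfl] at this
    omega
  · rw [if_neg (by simp only [Bool.and_eq_true, decide_eq_true_eq]; exact h)]
    intro he
    exact h ⟨by rw [he]; decide, by rw [he]; decide⟩

-- classification preserved by upperChar: punctuation and apostrophe tests agree
theorem upperChar_mem_punct (c : Char) :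
    (PySem.Chars.upperChar c ∈ (['.', '!', '?'] : List Char)) ↔
      (c ∈ (['.', '!', '?'] : List Char)) := by
  simp only [List.mem_cons, List.not_mem_nil, or_false]
  rw [upperChar_eq_sym c '.' (by decide), upperChar_eq_sym c '!' (by decide),
    upperChar_eq_sym c '?' (by decide)]

theorem upperChar_eq_quote (c : Char) :
    (PySem.Chars.upperChar c = '\'') ↔ (c = '\'') :=
  upperChar_eq_sym c '\'' (by decide)

def clsEq (a b : Char) : Prop :=
  ((a ∈ (['.', '!', '?'] : List Char)) ↔ (b ∈ (['.', '!', '?'] : List Char))) ∧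
    ((a = '\'') ↔ (b = '\''))

theorem clsEq_upper (c : Char) : clsEq (PySem.Chars.upperChar c) c :=
  ⟨upperChar_mem_punct c, upperChar_eq_quote c⟩

theorem clsEq_ccF (p c : Char) : clsEq (ccF p c) c := by
  unfold ccF
  split
  · exact clsEq_upper c
  · split
    · rename_i h
      rw [h.1]
      exact ⟨by decide, by decide⟩
    · exact ⟨Iff.rfl, Iff.rfl⟩

-- B equals the canonical form --------------------------------------------------

theorem sub2_sub1_tail (rest : List Char) : ∀ (p q : Char), (q = '\'' ↔ p = '\'') →
    cc_sub2 (some q) (cc_sub1_tail p rest) = ccGo p rest := by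
  induction rest with
  | nil => intro p q _; rfl
  | cons c rest ih =>
    intro p q hq
    unfold cc_sub1_tail cc_sub2 ccGo ccF
    by_cases hp : p ∈ (['.', '!', '?'] : List Char)
    · simp only [if_pos hp]
      have hni : ¬(PySem.Chars.upperChar c = 'i' ∧ (some q : Option Char) ≠ some '\'') := by
        intro h; exact upperChar_ne_i c h.1
      rw [if_neg hni]
      congr 1
      exact ih c (PySem.Chars.upperChar c) (upperChar_eq_quote c)
    · simp only [if_neg hp]
      have hc : (c = 'i' ∧ (some q : Option Char) ≠ some '\'') ↔ (c = 'i' ∧ p ≠ '\'') := by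
        simp only [ne_eq, Option.some.injEq]
        constructor
        · rintro ⟨h1, h2⟩; exact ⟨h1, fun h => h2 (hq.mpr h)⟩
        · rintro ⟨h1, h2⟩; exact ⟨h1, fun h => h2 (hq.mp h)⟩
      rw [if_congr hc rfl rfl]
      congr 1
      exact ih c c Iff.rfl

theorem alt_eq_ccSpec (l : List Char) : cc_sub2 none (cc_sub1 l) = ccSpec l := by
  cases l with
  | nil => rfl
  | cons c rest =>
    unfold cc_sub1 cc_sub2 ccSpec
    have hni : ¬(PySem.Chars.upperChar c = 'i' ∧ (none : Option Char) ≠ some '\'') := by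
      intro h; exact upperChar_ne_i c h.1
    rw [if_neg hni]
    congr 1
    exact sub2_sub1_tail rest c (PySem.Chars.upperChar c) (upperChar_eq_quote c)

-- lengths and pointwise characterisation of the canonical form ------------------

theorem ccGo_length (l : List Char) : ∀ p, (ccGo p l).length = l.length := by
  induction l with
  | nil => intro p; rfl
  | cons c rest ih => intro p; simp [ccGo, ih c]

theorem ccSpec_length (l : List Char) : (ccSpec l).length = l.length := by
  cases l with
  | nil => rfl
  | cons c rest => simp [ccSpec, ccGo_length]

theorem ccGo_getD (l : List Char) : ∀ (p : Char) (k : Nat), k < l.length →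
    (ccGo p l).getD k ' ' = ccF ((p :: l).getD k ' ') (l.getD k ' ') := by
  induction l with
  | nil => intro p k hk; simp at hk
  | cons c rest ih =>
    intro p k hk
    cases k with
    | zero => rfl
    | succ k =>
      simp only [ccGo, List.getD_cons_succ]
      exact ih c k (by simpa using hk)

theorem ccSpec_getD_succ (l : List Char) (k : Nat) (hk : k + 1 < l.length) :
    (ccSpec l).getD (k + 1) ' ' = ccF (l.getD k ' ') (l.getD (k + 1) ' ') := by
  cases l with
  | nil => simp at hk
  | cons c rest =>
    simp only [ccSpec, List.getD_cons_succ]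
    exact ccGo_getD rest c k (by simpa using hk)

theorem ccSpec_clsEq (l : List Char) (k : Nat) (hk : k < l.length) :
    clsEq ((ccSpec l).getD k ' ') (l.getD k ' ') := by
  cases l with
  | nil => simp at hk
  | cons c rest =>
    cases k with
    | zero => exact clsEq_upper c
    | succ k =>
      simp only [ccSpec, List.getD_cons_succ]
      rw [ccGo_getD rest c k (by simpa using hk)]
      exact clsEq_ccF _ _

-- A's loop reaches the canonical form -------------------------------------------

theorem loopA (l : List Char) : ∀ (n j : Nat), 1 ≤ j → l.length - j = n →
    (List.range' j n).foldl (fun acc i =>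
      if acc.getD (i - 1) ' ' ∈ (['.', '!', '?'] : List Char) then
        acc.set i (PySem.Chars.upperChar (acc.getD i ' '))
      else if acc.getD i ' ' = 'i' ∧ (i = 0 ∨ acc.getD (i - 1) ' ' ≠ '\'') then
        acc.set i 'I'
      else acc) ((ccSpec l).take j ++ l.drop j) = ccSpec l := by
  intro n
  induction n with
  | zero =>
    intro j hj hn
    have hge : l.length ≤ j := by omega
    simp only [List.range'_zero, List.foldl_nil]
    rw [List.drop_eq_nil_of_le hge, List.take_of_length_le (by rw [ccSpec_length]; exact hge),
      List.append_nil]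
  | succ n ih =>
    intro j hj hn
    have hjl : j < l.length := by omega
    have hjs : j < (ccSpec l).length := by rw [ccSpec_length]; exact hjl
    set S := ccSpec l with hS
    have htl : ((S.take j) : List Char).length = j := by
      rw [List.length_take]; omega
    -- the accumulator's reads
    have hread_prev : (S.take j ++ l.drop j).getD (j - 1) ' ' = S.getD (j - 1) ' ' := by
      rw [List.getD_append _ _ _ _ (by omega)]
      rw [List.getD, List.getD, List.getElem?_take_of_lt (by omega)]
    have hdropc : l.drop j = l.getD j ' ' :: l.drop (j + 1) := by
      rw [List.getD_eq_getElem l ' ' hjl]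
      exact List.drop_eq_getElem_cons hjl
    have hread_cur : (S.take j ++ l.drop j).getD j ' ' = l.getD j ' ' := by
      rw [List.getD_append_right _ _ _ _ (by omega), htl]
      simp [hdropc]
    -- conditions agree with the original chars
    have hcls : clsEq (S.getD (j - 1) ' ') (l.getD (j - 1) ' ') :=
      ccSpec_clsEq l (j - 1) (by omega)
    -- one step of the loop produces take (j+1) ++ drop (j+1)
    have hstep :
        (if (S.take j ++ l.drop j).getD (j - 1) ' ' ∈ (['.', '!', '?'] : List Char) then
          (S.take j ++ l.drop j).set j (PySem.Chars.upperChar ((S.take j ++ l.drop j).getD j ' '))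
        else if (S.take j ++ l.drop j).getD j ' ' = 'i' ∧
            (j = 0 ∨ (S.take j ++ l.drop j).getD (j - 1) ' ' ≠ '\'') then
          (S.take j ++ l.drop j).set j 'I'
        else (S.take j ++ l.drop j)) = S.take (j + 1) ++ l.drop (j + 1) := by
      have hset : ∀ v : Char, (S.take j ++ l.drop j).set j v = S.take j ++ v :: l.drop (j + 1) := by
        intro v
        rw [hdropc, List.set_append_right _ _ (by omega), htl]
        simp
      have htake1 : S.take (j + 1) = S.take j ++ [S.getD j ' '] := by
        rw [List.getD_eq_getElem S ' ' hjs]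
        exact List.take_succ_eq_append_getElem hjs
      have hSj : S.getD j ' ' = ccF (l.getD (j - 1) ' ') (l.getD j ' ') := by
        have hj1 : (j - 1) + 1 = j := by omega
        rw [hS]
        rw [← hj1]
        exact ccSpec_getD_succ l (j - 1) (by omega)
      rw [hread_prev, hread_cur, htake1, List.append_assoc, List.singleton_append]
      by_cases hp : l.getD (j - 1) ' ' ∈ (['.', '!', '?'] : List Char)
      · rw [if_pos (hcls.1.mpr hp), hset]
        congr 2
        rw [hSj]; unfold ccF; rw [if_pos hp]
      · rw [if_neg (fun h => hp (hcls.1.mp h))]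
        by_cases hi : l.getD j ' ' = 'i' ∧ l.getD (j - 1) ' ' ≠ '\''
        · rw [if_pos ⟨hi.1, Or.inr (fun h => hi.2 (hcls.2.mp h))⟩, hset]
          congr 2
          rw [hSj]; unfold ccF; rw [if_neg hp, if_pos hi]
        · rw [if_neg (by
            rintro ⟨h1, h2⟩
            rcases h2 with h2 | h2
            · omega
            · exact hi ⟨h1, fun h => h2 (hcls.2.mpr h)⟩)]
          have : ccF (l.getD (j - 1) ' ') (l.getD j ' ') = l.getD j ' ' := by
            unfold ccF; rw [if_neg hp, if_neg hi]
          rw [hSj, this, ← hdropc]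
    rw [List.range'_succ, List.foldl_cons, hstep]
    exact ih (j + 1) (by omega) (by omega)

theorem portA_eq_ccSpec (l : List Char) :
    (List.range' 1 ((match l with
        | [] => ([] : List Char)
        | c :: rest => PySem.Chars.upperChar c :: rest).length - 1)).foldl
      (fun acc i =>
        if acc.getD (i - 1) ' ' ∈ (['.', '!', '?'] : List Char) then
          acc.set i (PySem.Chars.upperChar (acc.getD i ' '))
        else if acc.getD i ' ' = 'i' ∧ (i = 0 ∨ acc.getD (i - 1) ' ' ≠ '\'') then
          acc.set i 'I'
        else acc)
      (match l with
        | [] => ([] : List Char)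
        | c :: rest => PySem.Chars.upperChar c :: rest) = ccSpec l := by
  cases l with
  | nil => rfl
  | cons c rest =>
    have h1 : (PySem.Chars.upperChar c :: rest) = (ccSpec (c :: rest)).take 1 ++ (c :: rest).drop 1 := by
      simp [ccSpec]
    have hm : (match c :: rest with
        | [] => ([] : List Char)
        | c :: rest => PySem.Chars.upperChar c :: rest) = PySem.Chars.upperChar c :: rest := rfl
    rw [hm, h1]
    have h2 : (List.take 1 (ccSpec (c :: rest)) ++ List.drop 1 (c :: rest)).length - 1
        = (c :: rest).length - 1 := by
      simp [ccSpec]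
    rw [h2]
    exact loopA (c :: rest) ((c :: rest).length - 1) 1 (le_refl 1) rfl

-- ===== VERDICT (by name: the statement is the Claim_ definition above) =====
theorem correct_capitalization_spec : Claim_equal_correct_capitalization := by
  intro text _
  unfold Spec_correct_capitalization correct_capitalization correct_capitalization_alt
  rw [alt_eq_ccSpec]
  simp only []
  rw [portA_eq_ccSpec]
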